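-- pv_equiv track=rewrite | github.com/LucaBolisUnimib/tesi_triennale | analyzeData.py | getStateAgent
-- ===== SOURCE A (Python) =====
-- AGENT_STATE_INDEX = 0
--
-- SAMPLE_STEP = 50
--
-- def getStateAgent(agent, locally):
--     result = dict()
--     interval = dict()
--     count = 0
--     for iter in agent:
--         if count % SAMPLE_STEP == 0:
--             result[count] = interval.copy()
--             if locally:
--                 interval = dict()
--         if iter[AGENT_STATE_INDEX] not in interval:
--             interval[iter[0]] = 0
--         interval[iter[0]] += 1
--         count += 1
--     return result
-- ===== SOURCE B (Python) =====
-- AGENT_STATE_INDEX = 0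
--
-- SAMPLE_STEP = 50
--
-- def getStateAgent(agent, locally):
--     items = list(agent)
--     result = dict()
--     for s in range(0, len(items), SAMPLE_STEP):
--         start = max(0, s - SAMPLE_STEP) if locally else 0
--         counts = dict()
--         for it in items[start:s]:
--             counts[it[AGENT_STATE_INDEX]] = counts.get(it[0], 0) + 1
--         result[s] = counts
--     return result
-- ===== Notes on version B (the rewrite author's own statement) =====
-- stated objective: alternative
-- what changed: A maintains one running interval counter and snapshots a copy of it every 50 items in a single pass; B instead loops over the snapshot points s = 0, 50, ... and recounts each snapshot independently from a slice (items[max(0,s-50):s] when locally, items[:s] cumulatively), building each result value as a fresh dict.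
-- outside the precondition, e.g. on getStateAgent([()], False): A raises IndexError, B returns {0: {}}
import Mathlib
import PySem

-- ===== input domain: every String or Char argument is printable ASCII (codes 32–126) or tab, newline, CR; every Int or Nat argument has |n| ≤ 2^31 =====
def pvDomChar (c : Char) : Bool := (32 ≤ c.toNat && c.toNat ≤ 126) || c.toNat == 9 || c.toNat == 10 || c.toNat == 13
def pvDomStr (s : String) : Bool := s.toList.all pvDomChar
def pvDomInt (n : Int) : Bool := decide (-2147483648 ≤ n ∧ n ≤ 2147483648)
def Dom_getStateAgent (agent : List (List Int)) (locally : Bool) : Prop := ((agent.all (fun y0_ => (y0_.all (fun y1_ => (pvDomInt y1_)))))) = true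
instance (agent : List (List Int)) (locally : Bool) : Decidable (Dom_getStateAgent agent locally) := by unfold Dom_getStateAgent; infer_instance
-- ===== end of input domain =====

-- B replaces A's single-pass running-counter loop by an independent per-snapshot recount over slices (alternative decomposition, same return value; not claimed faster).


-- ===== PORT A =====
-- `if iter[0] not in interval: interval[iter[0]] = 0` then `interval[iter[0]] += 1`
def pvBumpA (interval : PySem.Dict Int Int) (x : Int) : PySem.Dict Int Int :=
  let interval := if interval.contains x then interval else interval.insert x 0
  interval.insert x (interval.getD x 0 + 1)

-- one iteration of A's loop over the state (result, interval, count)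
def pvStepA (locally : Bool)
    (st : PySem.Dict Int (PySem.Dict Int Int) × PySem.Dict Int Int × Int)
    (it : List Int) : PySem.Dict Int (PySem.Dict Int Int) × PySem.Dict Int Int × Int :=
  let result := st.1
  let interval := st.2.1
  let count := st.2.2
  let ri :=
    if PySem.Int.mod count 50 = 0 then
      (result.insert count interval, if locally then PySem.Dict.empty else interval)
    else (result, interval)
  -- iter[0] ported as (pyGet? it 0).getD 0: exact under Pre_ (every row nonempty)
  (ri.1, pvBumpA ri.2 ((PySem.List.pyGet? it 0).getD 0), count + 1)

def getStateAgent (agent : List (List Int)) (locally : Bool) : List (Int × List (Int × Int)) :=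
  let fin := agent.foldl (pvStepA locally) (PySem.Dict.empty, PySem.Dict.empty, 0)
  fin.1.items.map (fun p => (p.1, p.2.items))

-- ===== PORT B =====
-- inner loop: counts[it[0]] = counts.get(it[0], 0) + 1 over one window
def pvCountWindow (window : List (List Int)) : PySem.Dict Int Int :=
  window.foldl (fun c it =>
    let x := (PySem.List.pyGet? it 0).getD 0
    c.insert x (c.getD x 0 + 1)) PySem.Dict.empty

-- one snapshot point s of B's outer loop: result[s] = counts over items[start:s]
def pvSnapB (agent : List (List Int)) (locally : Bool)
    (result : PySem.Dict Int (PySem.Dict Int Int)) (s : Int) :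
    PySem.Dict Int (PySem.Dict Int Int) :=
  let start : Int := if locally then max 0 (s - 50) else 0
  result.insert s (pvCountWindow (PySem.List.slice agent (some start) (some s)))

def getStateAgent_alt (agent : List (List Int)) (locally : Bool) : List (Int × List (Int × Int)) :=
  let res := (PySem.List.pyRange 0 (agent.length : Int) 50).foldl (pvSnapB agent locally) PySem.Dict.empty
  res.items.map (fun p => (p.1, p.2.items))

-- ===== PRECONDITION & SPEC =====
-- Pre_ excludes exactly the inputs on which Python A raises IndexError: an empty row makes iter[0] fail.
def Pre_getStateAgent (agent : List (List Int)) (locally : Bool) : Prop :=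
  ∀ it ∈ agent, it ≠ []
instance (agent : List (List Int)) (locally : Bool) : Decidable (Pre_getStateAgent agent locally) := by unfold Pre_getStateAgent; infer_instance
def pvWitness_getStateAgent : List (List Int) × Bool := ([[1], [2], [1]], true)

def Spec_getStateAgent (agent : List (List Int)) (locally : Bool) (out : List (Int × List (Int × Int))) : Prop := out = getStateAgent_alt agent locally
instance (agent : List (List Int)) (locally : Bool) (out : List (Int × List (Int × Int))) : Decidable (Spec_getStateAgent agent locally out) := by unfold Spec_getStateAgent; infer_instance

-- ===== CLAIM (what is proved, stated in full; the proofs are below) =====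
def Claim_equal_getStateAgent : Prop := ∀ (agent : List (List Int)) (locally : Bool), Dom_getStateAgent agent locally → Pre_getStateAgent agent locally → Spec_getStateAgent agent locally (getStateAgent agent locally)

-- ===== LEMMAS AND PROOFS =====

def pvCS (locally : Bool) (n : Nat) : Nat := if locally then 50 * ((n - 1) / 50) else 0

def pvBRes (agent : List (List Int)) (locally : Bool) (n : Nat) : PySem.Dict Int (PySem.Dict Int Int) :=
  (PySem.List.pyRange 0 (n : Int) 50).foldl (pvSnapB agent locally) PySem.Dict.empty

theorem pvBumpA_eq (d : PySem.Dict Int Int) (x : Int) :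
    pvBumpA d x = d.insert x (d.getD x 0 + 1) := by
  unfold pvBumpA
  by_cases h : d.contains x = true
  · simp [h]
  · simp only [Bool.not_eq_true] at h
    simp [h, PySem.Dict.getD_insert_self, PySem.Dict.insert_insert_self,
      PySem.Dict.getD_of_not_contains d (0:Int) h]

theorem pyRange50_succ (n : Nat) :
    PySem.List.pyRange 0 ((n : Int) + 1) 50 =
      PySem.List.pyRange 0 (n : Int) 50 ++ (if n % 50 = 0 then [(n : Int)] else []) := by
  rw [PySem.List.pyRange_of_pos _ _ (by norm_num), PySem.List.pyRange_of_pos _ _ (by norm_num)]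
  have h1 : (0:Int) < (n:Int) + 1 := by positivity
  rw [if_pos h1]
  by_cases hm : n % 50 = 0
  · rw [if_pos hm]
    have hc : (((n:Int) + 1 - 0 + 50 - 1) / 50).toNat = (if (0:Int) < n then (((n:Int) - 0 + 50 - 1) / 50).toNat else 0) + 1 := by
      by_cases hn : (0:Int) < n
      · rw [if_pos hn]; omega
      · rw [if_neg hn]; omega
    rw [hc, List.range_succ, List.map_append]
    congr 1
    simp only [List.map_cons, List.map_nil]
    congr 1
    by_cases hn : (0:Int) < n
    · rw [if_pos hn]; omega
    · rw [if_neg hn]; omega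
  · rw [if_neg hm, List.append_nil]
    have hc : (((n:Int) + 1 - 0 + 50 - 1) / 50).toNat = (if (0:Int) < n then (((n:Int) - 0 + 50 - 1) / 50).toNat else 0) := by
      have hn : (0:Int) < n := by omega
      rw [if_pos hn]; omega
    rw [hc]

theorem slice_append_last (p : List (List Int)) (a : List Int) (st s : Int)
    (h0 : 0 ≤ st) (h1 : st ≤ s) (hs : s ≤ (p.length : Int)) :
    PySem.List.slice (p ++ [a]) (some st) (some s) =
      PySem.List.slice p (some st) (some s) := by
  rw [PySem.List.slice_toNat _ h0 (le_trans h0 h1), PySem.List.slice_toNat _ h0 (le_trans h0 h1)]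
  rw [List.drop_append_of_le_length (by omega)]
  rw [List.take_append_of_le_length (by simp; omega)]

theorem pvSnapB_append (p : List (List Int)) (a : List Int) (locally : Bool)
    (r : PySem.Dict Int (PySem.Dict Int Int)) (s : Int) (h0 : 0 ≤ s) (hs : s ≤ (p.length : Int)) :
    pvSnapB (p ++ [a]) locally r s = pvSnapB p locally r s := by
  unfold pvSnapB
  simp only []
  rw [slice_append_last p a _ s ?h0 ?h1 hs]
  case h0 => cases locally <;> simp
  case h1 => cases locally <;> simp <;> omega

theorem pvBRes_append (p : List (List Int)) (a : List Int) (locally : Bool) (n : Nat)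
    (hn : n ≤ p.length) :
    pvBRes (p ++ [a]) locally n = pvBRes p locally n := by
  unfold pvBRes
  apply PySem.List.foldl_congr_mem
  intro acc s hsmem
  have := (PySem.List.mem_pyRange_iff_of_pos (by norm_num) s).1 hsmem
  exact pvSnapB_append p a locally acc s this.1 (by omega)

theorem pvCountWindow_append (p : List (List Int)) (a : List Int) :
    pvCountWindow (p ++ [a]) =
      (pvCountWindow p).insert ((PySem.List.pyGet? a 0).getD 0)
        ((pvCountWindow p).getD ((PySem.List.pyGet? a 0).getD 0) 0 + 1) := by
  unfold pvCountWindow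
  rw [List.foldl_append]
  rfl

theorem pvMain (locally : Bool) (p : List (List Int)) :
    p.foldl (pvStepA locally) (PySem.Dict.empty, PySem.Dict.empty, 0) =
      (pvBRes p locally p.length,
       pvCountWindow (p.drop (pvCS locally p.length)),
       (p.length : Int)) := by
  induction p using List.reverseRecOn with
  | nil =>
      simp only [List.foldl_nil, List.length_nil, List.drop_nil]
      have hr : pvBRes [] locally 0 = PySem.Dict.empty := by
        unfold pvBRes
        rw [show ((0:Nat):Int) = 0 from rfl, PySem.List.pyRange_of_pos _ _ (by norm_num)]
        simp
      rw [hr]; rfl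
  | append_singleton p a ih =>
      rw [List.foldl_append, ih]
      simp only [List.foldl_cons, List.foldl_nil, List.length_append, List.length_singleton]
      set n := p.length with hn
      have hmod : PySem.Int.mod (n:Int) 50 = ((n % 50 : Nat) : Int) := by
        exact_mod_cast PySem.Int.mod_natCast n 50
      unfold pvStepA
      simp only [hmod]
      set x := (PySem.List.pyGet? a 0).getD 0 with hx
      by_cases hm : n % 50 = 0
      · rw [if_pos (by exact_mod_cast congrArg (Nat.cast : Nat → Int) hm)]
        refine Prod.ext ?_ (Prod.ext ?_ ?_)
        · -- result component
          show (pvBRes p locally n).insert (n:Int) (pvCountWindow (p.drop (pvCS locally n)))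
              = pvBRes (p ++ [a]) locally (n + 1)
          unfold pvBRes
          rw [show (((n+1:Nat)):Int) = ((n:Int)+1) by push_cast; ring]
          rw [pyRange50_succ n, if_pos hm, List.foldl_append]
          rw [show (PySem.List.pyRange 0 (n:Int) 50).foldl (pvSnapB (p ++ [a]) locally) PySem.Dict.empty
                = pvBRes (p ++ [a]) locally n from rfl]
          rw [pvBRes_append p a locally n le_rfl]
          simp only [List.foldl_cons, List.foldl_nil]
          unfold pvSnapB
          simp only []
          congr 1
          -- windows agree
          by_cases hl : locally = true
      -- locally: window is p[n-50 : n]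
          · subst hl
            simp only [if_true]
            by_cases h50 : 50 ≤ n
            · have hst : max 0 ((n:Int) - 50) = (((n - 50 : Nat)):Int) := by omega
              rw [hst, slice_append_last p a _ _ (by positivity) (by omega) (by omega)]
              rw [PySem.List.slice_natCast]
              have : pvCS true n = n - 50 := by
                unfold pvCS; simp only [if_true]; omega
              rw [this]
              rw [List.take_of_length_le (by simp only [List.length_drop]; omega)]
            · have hn0 : n = 0 := by omega
              have hp : p = [] := List.eq_nil_of_length_eq_zero (by omega)
              simp only [hn0, hp, List.nil_append, Nat.cast_zero, List.drop_nil]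
              rw [show (max 0 ((0:Int) - 50)) = (0:Int) by norm_num]
              rw [PySem.List.slice_toNat _ le_rfl le_rfl]
              simp [pvCountWindow]
          · simp only [if_neg hl]
            have hcs : pvCS locally n = 0 := by unfold pvCS; simp [hl]
            rw [hcs, PySem.List.slice_zero_start, PySem.List.slice_to_natCast]
            rw [List.take_append_of_le_length (le_refl _), List.take_length, List.drop_zero]
        · -- interval component
          show pvBumpA (if locally then PySem.Dict.empty else pvCountWindow (p.drop (pvCS locally n))) x
              = pvCountWindow ((p ++ [a]).drop (pvCS locally (n + 1)))
          by_cases hl : locally = true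
          · subst hl
            have hcs : pvCS true (n+1) = n := by unfold pvCS; simp only [if_true]; omega
            rw [hcs, if_pos rfl]
            rw [List.drop_append_of_le_length le_rfl, List.drop_length, List.nil_append]
            rw [pvBumpA_eq]
            rfl
          · simp only [if_neg hl]
            have hcs : ∀ m, pvCS locally m = 0 := by intro m; unfold pvCS; simp [hl]
            rw [hcs, hcs, List.drop_zero, List.drop_zero]
            rw [pvBumpA_eq, pvCountWindow_append]
        · show (n:Int) + 1 = (((n+1:Nat)):Int)
          push_cast; ring
      · rw [if_neg (by exact_mod_cast hm)]
        refine Prod.ext ?_ (Prod.ext ?_ ?_)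
        · show pvBRes p locally n = pvBRes (p ++ [a]) locally (n + 1)
          unfold pvBRes
          rw [show (((n+1:Nat)):Int) = ((n:Int)+1) by push_cast; ring]
          rw [pyRange50_succ n, if_neg hm, List.append_nil]
          rw [show (PySem.List.pyRange 0 (n:Int) 50).foldl (pvSnapB (p ++ [a]) locally) PySem.Dict.empty
                = pvBRes (p ++ [a]) locally n from rfl]
          rw [pvBRes_append p a locally n le_rfl]
          rfl
        · show pvBumpA (pvCountWindow (p.drop (pvCS locally n))) x
              = pvCountWindow ((p ++ [a]).drop (pvCS locally (n + 1)))
          have hcs : pvCS locally (n+1) = pvCS locally n := by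
            unfold pvCS; cases locally <;> simp; omega
          have hle : pvCS locally n ≤ n := by
            unfold pvCS; cases locally <;> simp; omega
          rw [hcs, List.drop_append_of_le_length (by omega)]
          rw [pvBumpA_eq, pvCountWindow_append]
        · show (n:Int) + 1 = (((n+1:Nat)):Int)
          push_cast; ring

-- ===== VERDICT (by name: the statement is the Claim_ definition above) =====
theorem getStateAgent_spec : Claim_equal_getStateAgent := by
  intro agent locally _ _
  unfold Spec_getStateAgent getStateAgent getStateAgent_alt
  rw [pvMain]
  rfl
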